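-- pv_equiv track=rewrite | github.com/stijn-dejongh/spec-kitty | src/constitution/context.py | _extract_policy_summary
-- ===== SOURCE A (Python) =====
-- def _extract_policy_summary(content: str) -> list[str]:
--     lines = content.splitlines()
--     start = _find_section_start(lines, "## Policy Summary")
--
--     if start is None:
--         # Fallback: return the first meaningful bullet points in the document.
--         fallback = [line.strip().lstrip("- ").strip() for line in lines if line.strip().startswith("-")]
--         return [item for item in fallback if item][:8]
--
--     summary: list[str] = []
--     for line in lines[start + 1 :]:
--         stripped = line.strip()
--         if stripped.startswith("## "):
--             break
--         if stripped.startswith("-"):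
--             summary.append(stripped.lstrip("- ").strip())
--     return summary
--
-- def _find_section_start(lines: list[str], heading: str) -> int | None:
--     for index, line in enumerate(lines):
--         if line.strip() == heading:
--             return index
--     return None
-- ===== SOURCE B (Python) =====
-- def _extract_policy_summary(content: str) -> list[str]:
--     summary: list[str] = []
--     fallback: list[str] = []
--     in_section = False
--     found = False
--     for line in content.splitlines():
--         stripped = line.strip()
--         if in_section:
--             if stripped.startswith("## "):
--                 in_section = False
--             elif stripped.startswith("-"):
--                 summary.append(stripped.lstrip("- ").strip())
--         elif not found and stripped == "## Policy Summary":
--             in_section = True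
--             found = True
--         if stripped.startswith("-"):
--             item = stripped.lstrip("- ").strip()
--             if item:
--                 fallback.append(item)
--     return summary if found else fallback[:8]
-- ===== Notes on version B (the rewrite author's own statement) =====
-- stated objective: alternative
-- what changed: Replaced A's find-heading-index helper plus separate rescan/comprehension passes by a single linear pass that maintains in_section/found flags and builds the section summary and the filtered fallback bullet list simultaneously, choosing between them at the end.
import Mathlib
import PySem

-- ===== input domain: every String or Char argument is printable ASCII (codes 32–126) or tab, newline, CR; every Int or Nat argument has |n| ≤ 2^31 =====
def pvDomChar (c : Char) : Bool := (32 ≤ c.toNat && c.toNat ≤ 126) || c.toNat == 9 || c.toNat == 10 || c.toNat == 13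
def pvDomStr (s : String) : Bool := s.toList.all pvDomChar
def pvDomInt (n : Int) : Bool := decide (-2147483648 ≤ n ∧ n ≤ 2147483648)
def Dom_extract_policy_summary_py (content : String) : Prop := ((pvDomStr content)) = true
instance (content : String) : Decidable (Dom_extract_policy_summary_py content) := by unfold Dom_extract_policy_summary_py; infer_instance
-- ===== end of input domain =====

-- B replaces A's find-the-heading-then-rescan decomposition by one linear pass that
-- maintains in_section/found flags and builds the section summary and the filtered
-- fallback bullets simultaneously (objective: alternative single-pass decomposition).

-- shared: exact port of str.lstrip("- ") — drop leading '-' and ' ' characters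
def pvDropDash (cs : List Char) : List Char := cs.dropWhile (fun c => c == '-' || c == ' ')

-- ===== PORT A =====
def pvHeading : List Char := "## Policy Summary".toList

-- port of _find_section_start (enumerate loop with early return)
def pvFindSectionStart : List (List Char) → List Char → Nat → Option Nat
  | [], _, _ => none
  | l :: rest, h, i =>
    if PySem.Chars.strip l == h then some i else pvFindSectionStart rest h (i + 1)

-- port of A's summary-collection loop (break on '## ', append bullets)
def pvCollect : List (List Char) → List (List Char)
  | [] => []
  | l :: rest =>
    let stripped := PySem.Chars.strip l
    if PySem.Chars.startswith stripped ['#', '#', ' '] then []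
    else if PySem.Chars.startswith stripped ['-'] then
      PySem.Chars.strip (pvDropDash stripped) :: pvCollect rest
    else pvCollect rest

def extract_policy_summary_py (content : String) : List String :=
  let lines := (PySem.Str.splitlines content).map String.toList
  match pvFindSectionStart lines pvHeading 0 with
  | none =>
    let fallback := (lines.filter (fun l => PySem.Chars.startswith (PySem.Chars.strip l) ['-'])).map
        (fun l => PySem.Chars.strip (pvDropDash (PySem.Chars.strip l)))
    (((fallback.filter (fun item => !item.isEmpty)).take 8).map String.ofList)
  | some start =>
    (pvCollect (PySem.List.slice lines (some ((start : Int) + 1)) none)).map String.ofList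

-- ===== PORT B =====
-- B's single loop: state (summary, fallback, in_section, found)
def pvLoopB : List (List Char) → List (List Char) → List (List Char) → Bool → Bool →
    List (List Char) × List (List Char) × Bool
  | [], summary, fallback, _, found => (summary, fallback, found)
  | l :: rest, summary, fallback, inSec, found =>
    let stripped := PySem.Chars.strip l
    let st : List (List Char) × Bool × Bool :=
      if inSec then
        if PySem.Chars.startswith stripped ['#', '#', ' '] then (summary, false, found)
        else if PySem.Chars.startswith stripped ['-'] then
          (summary ++ [PySem.Chars.strip (pvDropDash stripped)], inSec, found)
        else (summary, inSec, found)
      else if !found && stripped == pvHeading then (summary, true, true)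
      else (summary, inSec, found)
    let fallback' :=
      if PySem.Chars.startswith stripped ['-'] then
        let item := PySem.Chars.strip (pvDropDash stripped)
        if !item.isEmpty then fallback ++ [item] else fallback
      else fallback
    pvLoopB rest st.1 fallback' st.2.1 st.2.2

def extract_policy_summary_py_alt (content : String) : List String :=
  let r := pvLoopB ((PySem.Str.splitlines content).map String.toList) [] [] false false
  (if r.2.2 then r.1 else r.2.1.take 8).map String.ofList

-- ===== PRECONDITION & SPEC =====
def Spec_extract_policy_summary_py (content : String) (out : List String) : Prop := out = extract_policy_summary_py_alt content
instance (content : String) (out : List String) : Decidable (Spec_extract_policy_summary_py content out) := by unfold Spec_extract_policy_summary_py; infer_instance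

-- ===== CLAIM (what is proved, stated in full; the proofs are below) =====
def Claim_equal_extract_policy_summary_py : Prop := ∀ (content : String), Dom_extract_policy_summary_py content → Spec_extract_policy_summary_py content (extract_policy_summary_py content)

-- ===== LEMMAS AND PROOFS =====

-- the fallback list as B accumulates it (filtered bullets, in order)
def pvFB : List (List Char) → List (List Char)
  | [] => []
  | l :: rest =>
    let stripped := PySem.Chars.strip l
    (if PySem.Chars.startswith stripped ['-'] then
       let item := PySem.Chars.strip (pvDropDash stripped)
       if !item.isEmpty then [item] else []
     else []) ++ pvFB rest

-- A's comprehension pipeline equals pvFB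
theorem pvFB_eq (ls : List (List Char)) :
    ((ls.filter (fun l => PySem.Chars.startswith (PySem.Chars.strip l) ['-'])).map
        (fun l => PySem.Chars.strip (pvDropDash (PySem.Chars.strip l)))).filter
      (fun item => !item.isEmpty) = pvFB ls := by
  induction ls with
  | nil => rfl
  | cons l rest ih =>
    simp only [pvFB, List.filter]
    by_cases h1 : PySem.Chars.startswith (PySem.Chars.strip l) ['-'] = true
    · simp only [h1, List.map, List.filter]
      by_cases h2 : (!(PySem.Chars.strip (pvDropDash (PySem.Chars.strip l))).isEmpty) = true
      · simp [h2, ih]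
      · simp only [Bool.not_eq_true] at h2
        simp [h2, ih]
    · simp only [Bool.not_eq_true] at h1
      simp [h1, ih]

theorem pvFindSectionStart_shift (ls : List (List Char)) (h : List Char) (k : Nat) :
    pvFindSectionStart ls h (k + 1) = (pvFindSectionStart ls h k).map (· + 1) := by
  induction ls generalizing k with
  | nil => rfl
  | cons l rest ih =>
    by_cases hm : (PySem.Chars.strip l == h) = true
    · simp [pvFindSectionStart, hm]
    · simp only [Bool.not_eq_true] at hm
      simp [pvFindSectionStart, hm, ih]

-- once found and out of the section, the summary is frozen and found stays true
theorem pvLoopB_done (ls : List (List Char)) (s fb : List (List Char)) :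
    (pvLoopB ls s fb false true).1 = s ∧ (pvLoopB ls s fb false true).2.2 = true := by
  induction ls generalizing fb with
  | nil => exact ⟨rfl, rfl⟩
  | cons l rest ih =>
    simp only [pvLoopB, Bool.not_true, Bool.false_and, Bool.false_eq_true, if_false]
    constructor
    · split
      · split
        · exact (ih _).1
        · exact (ih _).1
      · exact (ih _).1
    · split
      · split
        · exact (ih _).2
        · exact (ih _).2
      · exact (ih _).2

-- inside the section, B accumulates exactly pvCollect
theorem pvLoopB_inSec (ls : List (List Char)) (s fb : List (List Char)) :
    (pvLoopB ls s fb true true).1 = s ++ pvCollect ls ∧ (pvLoopB ls s fb true true).2.2 = true := by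
  induction ls generalizing s fb with
  | nil => simp [pvLoopB, pvCollect]
  | cons l rest ih =>
    by_cases h1 : PySem.Chars.startswith (PySem.Chars.strip l) ['#', '#', ' '] = true
    · simp only [pvLoopB, pvCollect, h1, if_true, List.append_nil]
      constructor
      · split
        · split
          · exact (pvLoopB_done rest s _).1
          · exact (pvLoopB_done rest s _).1
        · exact (pvLoopB_done rest s _).1
      · split
        · split
          · exact (pvLoopB_done rest s _).2
          · exact (pvLoopB_done rest s _).2
        · exact (pvLoopB_done rest s _).2
    · have h1' : PySem.Chars.startswith (PySem.Chars.strip l) ['#', '#', ' '] = false := by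
        simpa using h1
      by_cases h2 : PySem.Chars.startswith (PySem.Chars.strip l) ['-'] = true
      · simp only [pvLoopB, pvCollect, h1', h2, Bool.false_eq_true, if_false, if_true]
        constructor
        · split
          · rw [(ih _ _).1]; simp
          · rw [(ih _ _).1]; simp
        · split
          · exact (ih _ _).2
          · exact (ih _ _).2
      · have h2' : PySem.Chars.startswith (PySem.Chars.strip l) ['-'] = false := by
          simpa using h2
        simp only [pvLoopB, pvCollect, h1', h2', Bool.false_eq_true, if_false]
        exact ih s fb

-- main invariant: B's loop from the initial state, related to A's section search
theorem pvLoopB_main (ls : List (List Char)) (s fb : List (List Char)) :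
    (pvFindSectionStart ls pvHeading 0 = none →
        pvLoopB ls s fb false false = (s, fb ++ pvFB ls, false)) ∧
    (∀ i, pvFindSectionStart ls pvHeading 0 = some i →
        (pvLoopB ls s fb false false).1 = s ++ pvCollect (ls.drop (i + 1)) ∧
        (pvLoopB ls s fb false false).2.2 = true) := by
  induction ls generalizing s fb with
  | nil =>
    exact ⟨fun _ => by simp [pvLoopB, pvFB], fun i h => by simp [pvFindSectionStart] at h⟩
  | cons l rest ih =>
    by_cases hm : (PySem.Chars.strip l == pvHeading) = true
    · -- heading found at this line
      have hne : PySem.Chars.startswith (PySem.Chars.strip l) ['-'] = false := by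
        have heq : PySem.Chars.strip l = pvHeading := by simpa using hm
        rw [heq]; decide
      constructor
      · intro h
        simp only [pvFindSectionStart, hm, if_true] at h
        exact absurd h (by simp)
      · intro i h
        simp only [pvFindSectionStart, hm, if_true, Option.some.injEq] at h
        subst h
        simp only [pvLoopB, hm, hne, Bool.not_false, Bool.true_and, if_true, if_false,
          Bool.false_eq_true, List.drop_succ_cons, List.drop_zero]
        exact pvLoopB_inSec rest s fb
    · -- not the heading: state unchanged, fallback may grow
      have hm' : (PySem.Chars.strip l == pvHeading) = false := by simpa using hm
      have step : ∀ fb' : List (List Char), pvLoopB (l :: rest) s fb' false false =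
          pvLoopB rest s
            (if PySem.Chars.startswith (PySem.Chars.strip l) ['-'] then
               (if !(PySem.Chars.strip (pvDropDash (PySem.Chars.strip l))).isEmpty then
                  fb' ++ [PySem.Chars.strip (pvDropDash (PySem.Chars.strip l))] else fb')
             else fb') false false := by
        intro fb'
        simp only [pvLoopB, hm', Bool.not_false, Bool.true_and, Bool.false_eq_true, if_false]
      constructor
      · intro h
        simp only [pvFindSectionStart, hm', Bool.false_eq_true, if_false] at h
        rw [pvFindSectionStart_shift] at h
        simp only [Option.map_eq_none_iff] at h
        rw [step fb, (ih s _).1 h]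
        simp only [pvFB]
        split
        · split
          · simp
          · simp
        · simp
      · intro i h
        simp only [pvFindSectionStart, hm', Bool.false_eq_true, if_false] at h
        rw [pvFindSectionStart_shift] at h
        rcases Option.map_eq_some_iff.mp h with ⟨j, hj, hji⟩
        subst hji
        rw [step fb]
        rcases (ih s _).2 j hj with ⟨a, b⟩
        exact ⟨by simpa using a, b⟩

-- ===== VERDICT (by name: the statement is the Claim_ definition above) =====
theorem extract_policy_summary_py_spec : Claim_equal_extract_policy_summary_py := by
  intro content _
  unfold Spec_extract_policy_summary_py extract_policy_summary_py extract_policy_summary_py_alt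
  set lines := (PySem.Str.splitlines content).map String.toList with hl
  rcases hfind : pvFindSectionStart lines pvHeading 0 with _ | i
  · -- no heading: fallback path
    have hmain := (pvLoopB_main lines [] []).1 hfind
    simp only [hfind, hmain, Bool.false_eq_true, if_false, List.nil_append]
    rw [pvFB_eq]
  · -- heading at index i: section path
    rcases (pvLoopB_main lines [] []).2 i hfind with ⟨a, b⟩
    simp only [hfind, b, if_true, a, List.nil_append]
    have hsl : PySem.List.slice lines (some ((i : Int) + 1)) none = lines.drop (i + 1) := by
      have := PySem.List.slice_from_natCast lines (i + 1)
      simpa using this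
    rw [hsl]
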